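-- pv_equiv track=rewrite | github.com/PavelPotapov/find_most_occurring_elements_in_mass | main.py | findEl2
-- ===== SOURCE A (Python) =====
-- def findEl2(mass:list)-> set:
--     res = {}
--     for i in range(len(mass)):
--         res[mass[i]] = res[mass[i]] + 1 if mass[i] in res else 1
--     s = list(res.values())
--     s.sort()
--     value = {i for i in res if res[i]==s[-1]}
--     return value
-- ===== SOURCE B (Python) =====
-- def findEl2(mass: list) -> set:
--     res = {}
--     for x in mass:
--         res[x] = res.get(x, 0) + 1
--     buckets = {}
--     for k, v in res.items():
--         buckets.setdefault(v, set()).add(k)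
--     return buckets[sorted(buckets)[-1]]
-- ===== Notes on version B (the rewrite author's own statement) =====
-- stated objective: alternative
-- what changed: B replaces A's sort-all-values-then-rescan-the-dict pass with an inverted count->set-of-elements bucket index built once, answering by a single lookup of the highest bucket key.
-- outside the precondition, e.g. on findEl2([]): A returns set(), B raises IndexError
import Mathlib
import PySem

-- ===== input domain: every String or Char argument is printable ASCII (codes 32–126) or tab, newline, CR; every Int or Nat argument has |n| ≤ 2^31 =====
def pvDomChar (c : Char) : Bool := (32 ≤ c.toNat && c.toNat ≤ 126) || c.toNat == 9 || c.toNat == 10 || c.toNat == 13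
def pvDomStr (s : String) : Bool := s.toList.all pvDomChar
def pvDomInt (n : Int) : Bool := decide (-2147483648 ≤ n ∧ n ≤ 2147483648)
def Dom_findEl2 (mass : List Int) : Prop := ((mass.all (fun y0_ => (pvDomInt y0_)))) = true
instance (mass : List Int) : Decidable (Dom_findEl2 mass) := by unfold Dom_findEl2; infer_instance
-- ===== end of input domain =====

-- B replaces A's sort-all-values-then-rescan pass with an inverted count->bucket index
-- looked up at the highest count (alternative decomposition, similar cost).

-- ===== PORT A =====
-- res = {}; for i in range(len(mass)): res[mass[i]] = res[mass[i]] + 1 if mass[i] in res else 1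
def resA (mass : List Int) : PySem.Dict Int Int :=
  (PySem.List.pyRange 0 (PySem.List.len mass)).foldl
    (fun d i =>
      d.insert (PySem.List.pyGetD mass i 0)
        (if d.contains (PySem.List.pyGetD mass i 0)
         then d.getD (PySem.List.pyGetD mass i 0) 0 + 1 else 1))
    PySem.Dict.empty

-- s = list(res.values()); s.sort(); value = {i for i in res if res[i]==s[-1]}
def findEl2 (mass : List Int) : List Int :=
  match PySem.List.pyGet? (PySem.List.sorted (resA mass).values (fun v => v) false) (-1) with
  | none => []  -- mass = [] (excluded by Pre_findEl2): Python A returns set() there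
  | some last =>
      PySem.Set.ofList ((resA mass).keys.filter (fun k => (resA mass).getD k 0 == last))

-- ===== PORT B =====
-- res = {}; for x in mass: res[x] = res.get(x, 0) + 1
def resB (mass : List Int) : PySem.Dict Int Int :=
  mass.foldl (fun d x => d.insert x (d.getD x 0 + 1)) PySem.Dict.empty

-- buckets = {}; for k, v in res.items(): buckets.setdefault(v, set()).add(k)
def bucketsB (mass : List Int) : PySem.Dict Int (List Int) :=
  (resB mass).items.foldl
    (fun b p => b.modify p.2 [] (fun s => PySem.Set.add s p.1)) PySem.Dict.empty

-- return buckets[sorted(buckets)[-1]]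
def findEl2_alt (mass : List Int) : List Int :=
  match PySem.List.pyGet? (PySem.List.sorted (bucketsB mass).keys (fun c => c) false) (-1) with
  | none => []  -- mass = [] (excluded by Pre_findEl2): Python B raises IndexError there
  | some top => (bucketsB mass).getD top []

-- ===== PRECONDITION & SPEC =====
-- Pre_ excludes only the empty list: there A returns set() (the empty set comprehension
-- never evaluates the last element of s), while B's natural lookup of the highest bucket
-- raises IndexError, so no common value can be claimed.
def Pre_findEl2 (mass : List Int) : Prop := mass ≠ []
instance (mass : List Int) : Decidable (Pre_findEl2 mass) := by unfold Pre_findEl2; infer_instance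
def pvWitness_findEl2 : List Int := [1, 2, 2]

def Spec_findEl2 (mass : List Int) (out : List Int) : Prop := out = findEl2_alt mass
instance (mass : List Int) (out : List Int) : Decidable (Spec_findEl2 mass out) := by unfold Spec_findEl2; infer_instance

-- ===== CLAIM (what is proved, stated in full; the proofs are below) =====
def Claim_equal_findEl2 : Prop := ∀ (mass : List Int), Dom_findEl2 mass → Pre_findEl2 mass → Spec_findEl2 mass (findEl2 mass)

-- ===== LEMMAS AND PROOFS =====

-- Both frequency loops build collections.Counter(mass).
theorem resA_eq_counter (mass : List Int) : resA mass = PySem.Dict.counter mass := by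
  have h1 := PySem.List.foldl_pyRange_pyGetD mass 0
      (fun (d : PySem.Dict Int Int) (x : Int) =>
        d.insert x (if d.contains x then d.getD x 0 + 1 else 1))
      PySem.Dict.empty (a := 0) (le_refl 0)
  unfold resA
  rw [h1]
  simp only [Int.toNat_zero, List.drop_zero]
  rw [PySem.List.foldl_congr_mem mass _ (fun d x => d.insert x (d.getD x 0 + 1)) _ ?_]
  · exact PySem.Dict.foldl_insert_getD_add_one_eq_counter mass
  · intro d x _
    by_cases h : d.contains x = true
    · simp [h]
    · simp only [Bool.not_eq_true] at h
      simp [h, PySem.Dict.getD_of_not_contains d 0 h]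

theorem resB_eq_counter (mass : List Int) : resB mass = PySem.Dict.counter mass :=
  PySem.Dict.foldl_insert_getD_add_one_eq_counter mass

-- The bucket fold groups first components by second component, in order.
theorem bucket_getD (l : List (Int × Int)) (b : PySem.Dict Int (List Int))
    (hn : (l.map Prod.fst).Nodup)
    (hdisj : ∀ c k, k ∈ b.getD c [] → k ∉ l.map Prod.fst) (c : Int) :
    (l.foldl (fun b p => b.modify p.2 [] (fun s => PySem.Set.add s p.1)) b).getD c []
      = b.getD c [] ++ (l.filter (fun p => p.2 == c)).map Prod.fst := by
  induction l generalizing b with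
  | nil => simp
  | cons p t ih =>
    simp only [List.map_cons, List.nodup_cons] at hn
    have hpb : p.1 ∉ b.getD p.2 [] := fun hmem =>
      hdisj p.2 p.1 hmem (List.mem_cons_self)
    have hadd : PySem.Set.add (b.getD p.2 []) p.1 = b.getD p.2 [] ++ [p.1] := by
      simp [PySem.Set.add, PySem.Set.contains, hpb]
    have hstep : ∀ c', (b.modify p.2 [] (fun s => PySem.Set.add s p.1)).getD c' []
        = if c' = p.2 then b.getD p.2 [] ++ [p.1] else b.getD c' [] := by
      intro c'
      rw [PySem.Dict.getD_modify]
      split_ifs with h <;> simp [hadd]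
    rw [List.foldl_cons, ih _ hn.2]
    · rw [hstep c, List.filter_cons]
      by_cases hc : p.2 = c
      · simp [hc, List.map_cons]
      · have hbe : (p.2 == c) = false := by simp [hc]
        simp [hbe, Ne.symm hc]
    · intro c' k hk hkt
      rw [hstep c'] at hk
      split_ifs at hk with h
      · rcases List.mem_append.mp hk with h1 | h1
        · exact hdisj p.2 k h1 (List.mem_cons_of_mem _ hkt)
        · simp only [List.mem_singleton] at h1
          exact hn.1 (h1 ▸ hkt)
      · exact hdisj c' k hk (List.mem_cons_of_mem _ hkt)

-- The last element of Python-sorted zs is the maximum of zs.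
theorem last_sorted_isMax (zs : List Int) (h : zs ≠ []) :
    ∃ m, (PySem.List.sorted zs (fun x => x) false).getLast? = some m ∧
      m ∈ zs ∧ ∀ y ∈ zs, y ≤ m := by
  have hsne : PySem.List.sorted zs (fun x => x) false ≠ [] := by
    simpa [PySem.List.sorted_eq_nil_iff] using h
  have hperm := PySem.List.sorted_perm zs (fun x => x) false
  have hlen : 0 < (PySem.List.sorted zs (fun x => x) false).length :=
    List.length_pos_iff.mpr hsne
  refine ⟨(PySem.List.sorted zs (fun x => x) false)[(PySem.List.sorted zs (fun x => x) false).length - 1], ?_, ?_, ?_⟩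
  · rw [List.getLast?_eq_getElem?, List.getElem?_eq_getElem (by omega)]
  · exact hperm.mem_iff.mp (List.getElem_mem _)
  · intro y hy
    obtain ⟨i, hi, hiy⟩ := List.mem_iff_getElem.mp (hperm.mem_iff.mpr hy)
    rw [← hiy]
    exact PySem.List.key_sorted_getElem_mono zs (fun x => x) (by omega) (by omega)

-- Lists with the same members have the same sorted-last element.
theorem last_sorted_congr (xs ys : List Int) (hx : xs ≠ []) (hmem : ∀ a, a ∈ xs ↔ a ∈ ys) :
    (PySem.List.sorted xs (fun x => x) false).getLast?
      = (PySem.List.sorted ys (fun x => x) false).getLast? := by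
  have hy : ys ≠ [] := by
    obtain ⟨a, ha⟩ := List.exists_mem_of_ne_nil xs hx
    exact List.ne_nil_of_mem ((hmem a).mp ha)
  obtain ⟨m1, he1, hm1, hmax1⟩ := last_sorted_isMax xs hx
  obtain ⟨m2, he2, hm2, hmax2⟩ := last_sorted_isMax ys hy
  rw [he1, he2,
    le_antisymm (hmax2 m1 ((hmem m1).mp hm1)) (hmax1 m2 ((hmem m2).mpr hm2))]

-- ===== VERDICT (by name: the statement is the Claim_ definition above) =====
theorem findEl2_spec : Claim_equal_findEl2 := by
  intro mass _ hpre
  unfold Spec_findEl2 findEl2 findEl2_alt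
  have hnod : (PySem.Dict.counter mass).keys.Nodup := PySem.Dict.nodup_keys_counter mass
  have hBkeys : (bucketsB mass).keys
      = PySem.Set.ofList ((PySem.Dict.counter mass).items.map (fun p => p.2)) := by
    unfold bucketsB
    rw [resB_eq_counter,
      PySem.Dict.keys_foldl_modify_key (PySem.Dict.counter mass).items (fun p => p.2) []
        (fun _ p => fun s => PySem.Set.add s p.1) PySem.Dict.empty]
    rfl
  have hBget : ∀ c, (bucketsB mass).getD c []
      = ((PySem.Dict.counter mass).items.filter (fun p => p.2 == c)).map Prod.fst := by
    intro c
    unfold bucketsB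
    rw [resB_eq_counter, bucket_getD _ _ hnod (by simp [PySem.Dict.getD_empty]) c]
    simp [PySem.Dict.getD_empty]
  have hvalsne : (PySem.Dict.counter mass).values ≠ [] := by
    intro hv
    have hitnil : (PySem.Dict.counter mass).items = [] := List.map_eq_nil_iff.mp hv
    obtain ⟨a, ha⟩ := List.exists_mem_of_ne_nil mass hpre
    have hk : a ∈ (PySem.Dict.counter mass).keys := by
      rw [PySem.Dict.keys_counter]
      exact (PySem.Set.mem_ofList mass a).mpr ha
    rw [show (PySem.Dict.counter mass).keys = (PySem.Dict.counter mass).items.map Prod.fst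
      from rfl, hitnil] at hk
    simp at hk
  have hsame : ∀ a, a ∈ (PySem.Dict.counter mass).values
      ↔ a ∈ PySem.Set.ofList ((PySem.Dict.counter mass).items.map (fun p => p.2)) := by
    intro a
    rw [PySem.Set.mem_ofList]
    exact Iff.rfl
  have hlast : PySem.List.pyGet?
      (PySem.List.sorted (resA mass).values (fun v => v) false) (-1)
      = PySem.List.pyGet? (PySem.List.sorted (bucketsB mass).keys (fun c => c) false) (-1) := by
    rw [resA_eq_counter, hBkeys, PySem.List.pyGet?_neg_one, PySem.List.pyGet?_neg_one]
    exact last_sorted_congr _ _ hvalsne hsame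
  rw [hlast]
  cases he : PySem.List.pyGet?
      (PySem.List.sorted (bucketsB mass).keys (fun c => c) false) (-1) with
  | none => rfl
  | some top =>
    show PySem.Set.ofList ((resA mass).keys.filter (fun k => (resA mass).getD k 0 == top))
        = (bucketsB mass).getD top []
    rw [hBget top, resA_eq_counter]
    rw [PySem.Set.ofList_eq_self_of_nodup _ (List.Nodup.filter _ hnod)]
    rw [PySem.Dict.items_eq_map_keys _ hnod 0, List.filter_map, List.map_map]
    simp [Function.comp_def]
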